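-- pv_equiv track=rewrite | github.com/tomsilver/programmatic-policy-learning | src/programmatic_policy_learning/approaches/lpp_utils/utils.py | _compress_rows
-- ===== SOURCE A (Python) =====
-- def _compress_ranges(cols: list[int]) -> list[str]:
--     if not cols:
--         return []
--     ranges: list[str] = []
--     start = prev = cols[0]
--     for col in cols[1:]:
--         if col == prev + 1:
--             prev = col
--             continue
--         ranges.append(f"{start}" if start == prev else f"{start}-{prev}")
--         start = prev = col
--     ranges.append(f"{start}" if start == prev else f"{start}-{prev}")
--     return ranges
--
-- def _compress_rows(positions: list[tuple[int, int]]) -> dict[int, list[str]]: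
--     rows: dict[int, list[int]] = {}
--     for r, c in positions:
--         rows.setdefault(int(r), []).append(int(c))
--     compressed: dict[int, list[str]] = {}
--     for r in sorted(rows):
--         cols = sorted(rows[r])
--         compressed[r] = _compress_ranges(cols)
--     return compressed
-- ===== SOURCE B (Python) =====
-- def _runs(cols: list[int]) -> list[str]:
--     starts = [i for i in range(len(cols)) if i == 0 or cols[i] != cols[i - 1] + 1]
--     ends = [i for i in range(len(cols)) if i == len(cols) - 1 or cols[i + 1] != cols[i] + 1]
--     return [f"{cols[s]}" if cols[s] == cols[e] else f"{cols[s]}-{cols[e]}"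
--             for s, e in zip(starts, ends)]
--
--
-- def _compress_rows(positions: list[tuple[int, int]]) -> dict[int, list[str]]:
--     return {
--         r: _runs(sorted(c for q, c in positions if q == r))
--         for r in sorted({int(r) for r, _ in positions})
--     }
-- ===== Notes on version B (the rewrite author's own statement) =====
-- stated objective: alternative
-- what changed: B replaces A's dict-of-lists grouping plus start/prev run state machine by a declarative pipeline: it sorts the distinct rows (a set), collects each row's columns by filtering, and compresses runs by computing the run-start and run-end index lists as two independent boundary comprehensions zipped together, instead of emitting ranges sequentially from loop state.
import Mathlib
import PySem

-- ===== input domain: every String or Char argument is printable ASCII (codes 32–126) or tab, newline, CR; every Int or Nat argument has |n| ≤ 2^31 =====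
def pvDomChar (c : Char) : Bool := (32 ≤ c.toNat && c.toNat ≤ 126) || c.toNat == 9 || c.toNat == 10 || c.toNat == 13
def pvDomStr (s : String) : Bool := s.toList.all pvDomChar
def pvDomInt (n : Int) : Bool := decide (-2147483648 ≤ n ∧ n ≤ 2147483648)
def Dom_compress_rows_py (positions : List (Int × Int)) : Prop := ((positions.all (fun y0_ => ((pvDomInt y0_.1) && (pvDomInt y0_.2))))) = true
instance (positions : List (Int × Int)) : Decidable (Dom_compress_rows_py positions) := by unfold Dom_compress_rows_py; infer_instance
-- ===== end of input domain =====

-- B replaces A's dict grouping + start/prev state machine by sorted-distinct-rows with per-row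
-- filtering and a boundary-index (starts/ends zipped) run compressor (objective: alternative).

-- ===== PORT A =====
-- f"{start}" if start == prev else f"{start}-{prev}"  (both Pythons format a run this way)
def pvFmt (a b : Int) : String :=
  if a = b then PySem.Int.toStr a else PySem.Int.toStr a ++ "-" ++ PySem.Int.toStr b

-- the body of A's 'for col in cols[1:]' loop, on state (ranges, start, prev)
def pvStepA (s : List String × Int × Int) (col : Int) : List String × Int × Int :=
  if col = s.2.2 + 1 then (s.1, s.2.1, col)
  else (s.1 ++ [pvFmt s.2.1 s.2.2], col, col)

-- _compress_ranges
def compressRangesA (cols : List Int) : List String :=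
  match cols with
  | [] => []
  | c0 :: rest =>
    let st := rest.foldl pvStepA ([], c0, c0)
    st.1 ++ [pvFmt st.2.1 st.2.2]

def compress_rows_py (positions : List (Int × Int)) : List (Int × List String) :=
  -- rows.setdefault(r, []).append(c)
  let rows := positions.foldl
    (fun (d : PySem.Dict Int (List Int)) p => d.modify p.1 [] (· ++ [p.2])) PySem.Dict.empty
  -- for r in sorted(rows): compressed[r] = _compress_ranges(sorted(rows[r]))
  ((PySem.List.sorted rows.keys (fun x => x) false).foldl
    (fun (comp : PySem.Dict Int (List String)) r =>
      comp.insert r (compressRangesA (PySem.List.sorted (rows.getD r []) (fun x => x) false)))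
    PySem.Dict.empty).items

-- ===== PORT B =====
-- [i for i in range(len(cols)) if i == 0 or cols[i] != cols[i-1] + 1]
-- (pyGetD's value at i-1 only matters when i ≠ 0, exactly where Python's short-circuit reads it; there 0 ≤ i-1 < len)
def pvStartsB (cols : List Int) : List Int :=
  (PySem.List.pyRange 0 (cols.length : Int) 1).filter
    (fun i => i == 0 || !(PySem.List.pyGetD cols i 0 == PySem.List.pyGetD cols (i - 1) 0 + 1))

-- [i for i in range(len(cols)) if i == len(cols) - 1 or cols[i+1] != cols[i] + 1]
-- (pyGetD's value at i+1 only matters when i ≠ len-1, exactly where Python's short-circuit reads it)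
def pvEndsB (cols : List Int) : List Int :=
  (PySem.List.pyRange 0 (cols.length : Int) 1).filter
    (fun i => i == (cols.length : Int) - 1 ||
      !(PySem.List.pyGetD cols (i + 1) 0 == PySem.List.pyGetD cols i 0 + 1))

-- _runs: zip(starts, ends) formatted
def runsB (cols : List Int) : List String :=
  ((pvStartsB cols).zip (pvEndsB cols)).map
    (fun p => pvFmt (PySem.List.pyGetD cols p.1 0) (PySem.List.pyGetD cols p.2 0))

def compress_rows_py_alt (positions : List (Int × Int)) : List (Int × List String) :=
  -- {r: _runs(sorted(c for q, c in positions if q == r)) for r in sorted({int(r) for r, _ in positions})}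
  (PySem.Dict.ofList
    ((PySem.List.sorted (PySem.Set.ofList (positions.map (fun p => p.1))) (fun x => x) false).map
      (fun r => (r, runsB (PySem.List.sorted
        ((positions.filter (fun q => q.1 == r)).map (fun q => q.2)) (fun x => x) false))))).items

-- ===== PRECONDITION & SPEC =====
def Spec_compress_rows_py (positions : List (Int × Int)) (out : List (Int × List String)) : Prop := out = compress_rows_py_alt positions
instance (positions : List (Int × Int)) (out : List (Int × List String)) : Decidable (Spec_compress_rows_py positions out) := by unfold Spec_compress_rows_py; infer_instance

-- ===== CLAIM (what is proved, stated in full; the proofs are below) =====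
def Claim_equal_compress_rows_py : Prop := ∀ (positions : List (Int × Int)), Dom_compress_rows_py positions → Spec_compress_rows_py positions (compress_rows_py positions)

-- ===== LEMMAS AND PROOFS =====

-- lookups below the old length are unchanged by appending one element
lemma pyGetD_snoc (xs : List Int) (c d i : Int) (h0 : 0 ≤ i) (h1 : i < (xs.length : Int)) :
    PySem.List.pyGetD (xs ++ [c]) i d = PySem.List.pyGetD xs i d := by
  rw [PySem.List.pyGetD_eq_getElem _ d h0 (by simp; omega),
      PySem.List.pyGetD_eq_getElem _ d h0 h1]
  rw [List.getElem_append_left (by omega)]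

lemma pyGetD_snoc_self (xs : List Int) (c d : Int) :
    PySem.List.pyGetD (xs ++ [c]) (xs.length : Int) d = c := by
  rw [PySem.List.pyGetD_eq_getElem _ d (by positivity) (by simp)]
  simp

lemma pv_len_pos {xs : List Int} (hx : xs ≠ []) : 1 ≤ xs.length := by
  cases xs with
  | nil => exact absurd rfl hx
  | cons a t => exact Nat.succ_le_succ (Nat.zero_le _)

-- ends of a nonempty list always finish with the last index
def pvEndsPrefix (cols : List Int) : List Int :=
  (PySem.List.pyRange 0 ((cols.length : Int) - 1) 1).filter
    (fun i => i == (cols.length : Int) - 1 ||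
      !(PySem.List.pyGetD cols (i + 1) 0 == PySem.List.pyGetD cols i 0 + 1))

lemma ends_decomp (xs : List Int) (hx : xs ≠ []) :
    pvEndsB xs = pvEndsPrefix xs ++ [(xs.length : Int) - 1] := by
  have hn : 1 ≤ xs.length := pv_len_pos hx
  have hsplit : PySem.List.pyRange 0 (xs.length : Int) 1
      = PySem.List.pyRange 0 ((xs.length : Int) - 1) 1 ++ [(xs.length : Int) - 1] := by
    have h := PySem.List.pyRange_one_succ_right (a := 0) (b := (xs.length : Int) - 1) (by omega)
    have h2 : ((xs.length : Int) - 1) + 1 = (xs.length : Int) := by omega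
    rw [h2] at h
    exact h
  unfold pvEndsB pvEndsPrefix
  rw [hsplit, List.filter_append]
  congr 1
  simp

lemma starts_snoc (xs : List Int) (hx : xs ≠ []) (c : Int) :
    pvStartsB (xs ++ [c]) =
      pvStartsB xs ++
        (if c = PySem.List.pyGetD xs ((xs.length : Int) - 1) 0 + 1 then [] else [(xs.length : Int)]) := by
  have hn : 1 ≤ xs.length := pv_len_pos hx
  have hlen : (((xs ++ [c]).length : Nat) : Int) = (xs.length : Int) + 1 := by
    simp
  unfold pvStartsB
  rw [hlen, PySem.List.pyRange_one_succ_right (by positivity), List.filter_append]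
  congr 1
  · apply List.filter_congr
    intro i hi
    obtain ⟨h0, h1⟩ := PySem.List.mem_pyRange_one.mp hi
    by_cases hi0 : i = 0
    · subst hi0; simp
    · rw [pyGetD_snoc xs c 0 i h0 h1, pyGetD_snoc xs c 0 (i - 1) (by omega) (by omega)]
  · have hne : (((xs.length : Int)) == 0) = false := by
      simp only [beq_eq_false_iff_ne, ne_eq]
      omega
    rw [List.filter_cons, List.filter_nil]
    rw [pyGetD_snoc_self xs c 0,
        pyGetD_snoc xs c 0 ((xs.length : Int) - 1) (by omega) (by omega), hne, Bool.false_or]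
    by_cases hc : c = PySem.List.pyGetD xs ((xs.length : Int) - 1) 0 + 1 <;> simp [hc]

lemma ends_snoc (xs : List Int) (hx : xs ≠ []) (c : Int) :
    pvEndsB (xs ++ [c]) =
      pvEndsPrefix xs ++
        (if c = PySem.List.pyGetD xs ((xs.length : Int) - 1) 0 + 1 then [] else [(xs.length : Int) - 1]) ++
        [(xs.length : Int)] := by
  have hn : 1 ≤ xs.length := pv_len_pos hx
  have hlen : (((xs ++ [c]).length : Nat) : Int) = (xs.length : Int) + 1 := by simp
  have hsplit1 : PySem.List.pyRange 0 ((xs.length : Int) + 1) 1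
      = PySem.List.pyRange 0 (xs.length : Int) 1 ++ [(xs.length : Int)] :=
    PySem.List.pyRange_one_succ_right (by positivity)
  have hsplit2 : PySem.List.pyRange 0 (xs.length : Int) 1
      = PySem.List.pyRange 0 ((xs.length : Int) - 1) 1 ++ [(xs.length : Int) - 1] := by
    have h := PySem.List.pyRange_one_succ_right (a := 0) (b := (xs.length : Int) - 1) (by omega)
    have h2 : ((xs.length : Int) - 1) + 1 = (xs.length : Int) := by omega
    rw [h2] at h
    exact h
  unfold pvEndsB pvEndsPrefix
  rw [hlen, add_sub_cancel_right, hsplit1, hsplit2, List.filter_append, List.filter_append]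
  congr 1
  congr 1
  · apply List.filter_congr
    intro i hi
    obtain ⟨h0, h1⟩ := PySem.List.mem_pyRange_one.mp hi
    have hne1 : (i == (xs.length : Int)) = false := by
      simp only [beq_eq_false_iff_ne, ne_eq]; omega
    have hne2 : (i == (xs.length : Int) - 1) = false := by
      simp only [beq_eq_false_iff_ne, ne_eq]; omega
    rw [hne1, hne2, pyGetD_snoc xs c 0 (i + 1) (by omega) (by omega),
        pyGetD_snoc xs c 0 i h0 (by omega)]
  · have hne : (((xs.length : Int) - 1) == (xs.length : Int)) = false := by
      simp only [beq_eq_false_iff_ne, ne_eq]; omega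
    have hidx : ((xs.length : Int) - 1) + 1 = (xs.length : Int) := by omega
    rw [List.filter_cons, List.filter_nil, hne, hidx, pyGetD_snoc_self xs c 0,
        pyGetD_snoc xs c 0 ((xs.length : Int) - 1) (by omega) (by omega), Bool.false_or]
    by_cases hc : c = PySem.List.pyGetD xs ((xs.length : Int) - 1) 0 + 1 <;> simp [hc]
  · simp

lemma mem_startsB (xs : List Int) (i : Int) (h : i ∈ pvStartsB xs) : 0 ≤ i ∧ i < (xs.length : Int) := by
  have := (List.mem_filter.mp h).1
  exact PySem.List.mem_pyRange_one.mp this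

lemma mem_endsPrefix (xs : List Int) (i : Int) (h : i ∈ pvEndsPrefix xs) :
    0 ≤ i ∧ i < (xs.length : Int) - 1 := by
  have := (List.mem_filter.mp h).1
  exact PySem.List.mem_pyRange_one.mp this

-- the run-structure invariant tying A's loop state to B's boundary lists
lemma main_inv (x0 : Int) (xt : List Int) :
    ∃ S E s,
      pvStartsB (x0 :: xt) = S ++ [s] ∧
      pvEndsB (x0 :: xt) = E ++ [((x0 :: xt).length : Int) - 1] ∧
      S.length = E.length ∧
      (xt.foldl pvStepA ([], x0, x0)).1 =
        (S.zip E).map (fun p => pvFmt (PySem.List.pyGetD (x0 :: xt) p.1 0)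
                                      (PySem.List.pyGetD (x0 :: xt) p.2 0)) ∧
      (xt.foldl pvStepA ([], x0, x0)).2.1 = PySem.List.pyGetD (x0 :: xt) s 0 ∧
      (xt.foldl pvStepA ([], x0, x0)).2.2 =
        PySem.List.pyGetD (x0 :: xt) (((x0 :: xt).length : Int) - 1) 0 := by
  induction xt using List.reverseRecOn with
  | nil =>
    refine ⟨[], [], 0, ?_, ?_, rfl, by simp, ?_, ?_⟩
    · unfold pvStartsB
      have h01 : PySem.List.pyRange 0 1 1 = [0] := by decide
      simp [h01]
    · unfold pvEndsB
      have h01 : PySem.List.pyRange 0 1 1 = [0] := by decide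
      simp [h01]
    · simp [PySem.List.pyGetD_of_nonneg]
    · simp [PySem.List.pyGetD_of_nonneg]
  | append_singleton yt c IH =>
    obtain ⟨S, E, s, h1, h2, h3, h4, h5, h6⟩ := IH
    set ys : List Int := x0 :: yt with hys
    set st := yt.foldl pvStepA ([], x0, x0) with hst
    have hysne : ys ≠ [] := by simp [hys]
    have hm1 : 1 ≤ ys.length := pv_len_pos hysne
    have hxs : x0 :: (yt ++ [c]) = ys ++ [c] := by simp [hys]
    have hlen : (((ys ++ [c]).length : Nat) : Int) = (ys.length : Int) + 1 := by simp
    have hEp : E = pvEndsPrefix ys := by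
      have h := (ends_decomp ys hysne).symm.trans h2
      exact (List.append_cancel_right h).symm
    have hSb : ∀ i ∈ S ++ [s], 0 ≤ i ∧ i < (ys.length : Int) := by
      intro i hi; exact mem_startsB ys i (h1 ▸ hi)
    have hEb : ∀ i ∈ E, 0 ≤ i ∧ i < (ys.length : Int) - 1 := by
      intro i hi; exact mem_endsPrefix ys i (hEp ▸ hi)
    have hfold : (yt ++ [c]).foldl pvStepA ([], x0, x0) = pvStepA st c := by
      rw [List.foldl_append, ← hst]
      rfl
    have hmapstable :
        (S.zip E).map (fun p => pvFmt (PySem.List.pyGetD ys p.1 0) (PySem.List.pyGetD ys p.2 0))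
        = (S.zip E).map (fun p => pvFmt (PySem.List.pyGetD (ys ++ [c]) p.1 0)
                                        (PySem.List.pyGetD (ys ++ [c]) p.2 0)) := by
      apply List.map_congr_left
      intro p hp
      obtain ⟨hpS, hpE⟩ := List.of_mem_zip hp
      obtain ⟨ha, hb⟩ := hSb p.1 (List.mem_append_left _ hpS)
      obtain ⟨hc1, hc2⟩ := hEb p.2 hpE
      rw [pyGetD_snoc ys c 0 p.1 ha hb, pyGetD_snoc ys c 0 p.2 hc1 (by omega)]
    by_cases hc : c = st.2.2 + 1
    · -- the new column extends the last run
      refine ⟨S, E, s, ?_, ?_, h3, ?_, ?_, ?_⟩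
      · rw [hxs, starts_snoc ys hysne c, if_pos (by rw [← h6]; exact hc), List.append_nil, h1]
      · rw [hxs, ends_snoc ys hysne c, if_pos (by rw [← h6]; exact hc), List.append_nil, hEp]
        congr 1
        rw [hlen]
        norm_num
      · rw [hxs, hfold]
        simp only [pvStepA, if_pos hc]
        rw [h4, hmapstable]
      · rw [hxs, hfold]
        simp only [pvStepA, if_pos hc]
        obtain ⟨ha, hb⟩ := hSb s (by simp)
        rw [h5, pyGetD_snoc ys c 0 s ha hb]
      · rw [hxs, hfold]
        simp only [pvStepA, if_pos hc]
        have hidx : (((ys ++ [c]).length : Nat) : Int) - 1 = (ys.length : Int) := by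
          rw [hlen]; omega
        rw [hidx, pyGetD_snoc_self ys c 0]
    · -- the new column starts a new run
      refine ⟨S ++ [s], E ++ [(ys.length : Int) - 1], (ys.length : Int), ?_, ?_, by simp [h3], ?_, ?_, ?_⟩
      · rw [hxs, starts_snoc ys hysne c, if_neg (by rw [← h6]; exact hc), h1]
      · rw [hxs, ends_snoc ys hysne c, if_neg (by rw [← h6]; exact hc), hEp]
        have hidx : (((ys ++ [c]).length : Nat) : Int) - 1 = (ys.length : Int) := by
          rw [hlen]; omega
        rw [hidx]
      · rw [hxs, hfold]
        simp only [pvStepA, if_neg hc]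
        rw [List.zip_append h3, List.map_append, h4, hmapstable]
        congr 1
        simp only [List.zip_cons_cons, List.zip_nil_right, List.map_cons, List.map_nil]
        obtain ⟨ha, hb⟩ := hSb s (by simp)
        rw [h5, h6, pyGetD_snoc ys c 0 s ha hb,
            pyGetD_snoc ys c 0 ((ys.length : Int) - 1) (by omega) (by omega)]
      · rw [hxs, hfold]
        simp only [pvStepA, if_neg hc]
        rw [pyGetD_snoc_self ys c 0]
      · rw [hxs, hfold]
        simp only [pvStepA, if_neg hc]
        have hidx : (((ys ++ [c]).length : Nat) : Int) - 1 = (ys.length : Int) := by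
          rw [hlen]; omega
        rw [hidx, pyGetD_snoc_self ys c 0]

lemma compressRanges_eq (cols : List Int) : compressRangesA cols = runsB cols := by
  cases cols with
  | nil =>
    have h00 : PySem.List.pyRange 0 0 1 = [] := by decide
    simp [compressRangesA, runsB, pvStartsB, pvEndsB, h00]
  | cons x0 xt =>
    obtain ⟨S, E, s, h1, h2, h3, h4, h5, h6⟩ := main_inv x0 xt
    show (let st := xt.foldl pvStepA ([], x0, x0); st.1 ++ [pvFmt st.2.1 st.2.2]) = runsB (x0 :: xt)
    unfold runsB
    rw [h1, h2, List.zip_append h3, List.map_append]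
    simp only [List.zip_cons_cons, List.zip_nil_right, List.map_cons, List.map_nil]
    rw [h4, h5, h6]

-- ===== VERDICT (by name: the statement is the Claim_ definition above) =====
theorem compress_rows_py_spec : Claim_equal_compress_rows_py := by
  intro positions _
  unfold Spec_compress_rows_py compress_rows_py compress_rows_py_alt
  set rows := positions.foldl
    (fun (d : PySem.Dict Int (List Int)) p => d.modify p.1 [] (· ++ [p.2])) PySem.Dict.empty with hrows
  have hkeys : rows.keys = PySem.Set.ofList (positions.map (fun p => p.1)) := by
    rw [hrows]
    rw [PySem.Dict.keys_foldl_modify_key positions (fun p => p.1) [] (fun _ p => (· ++ [p.2]))]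
    simp [PySem.Dict.keys_empty]
    rfl
  have hnodup : rows.keys.Nodup := by
    rw [hrows]
    exact PySem.Dict.nodup_keys_foldl_modify_key positions (·.1) [] (fun _ p => (· ++ [p.2]))
      PySem.Dict.empty (by simp [PySem.Dict.keys_empty])
  have hsnodup : (PySem.List.sorted rows.keys (fun x => x) false).Nodup :=
    (PySem.List.sorted_perm rows.keys (fun x => x) false).nodup_iff.mpr hnodup
  have hgetD : ∀ r : Int, rows.getD r [] = (positions.filter (fun q => q.1 == r)).map (fun q => q.2) := by
    intro r
    rw [hrows, PySem.Dict.getD_foldl_modify_append positions PySem.Dict.empty r]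
    simp [PySem.Dict.getD_empty]
  have hA := PySem.Dict.items_foldl_insert_fresh
    (PySem.List.sorted rows.keys (fun x => x) false) (fun r => r)
    (fun r => compressRangesA (PySem.List.sorted (rows.getD r []) (fun x => x) false))
    PySem.Dict.empty (by intro a _; simp [PySem.Dict.contains_empty])
    (by simpa using hsnodup)
  have hB := PySem.Dict.items_foldl_insert_fresh
    ((PySem.List.sorted rows.keys (fun x => x) false).map
      (fun r => (r, runsB (PySem.List.sorted
        ((positions.filter (fun q => q.1 == r)).map (fun q => q.2)) (fun x => x) false))))
    (fun p => p.1) (fun p => p.2)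
    PySem.Dict.empty (by intro a _; simp [PySem.Dict.contains_empty])
    (by simpa [List.map_map, Function.comp_def] using hsnodup)
  show _ = (PySem.Dict.ofList _).items
  rw [← hkeys]
  rw [show (PySem.Dict.ofList ((PySem.List.sorted rows.keys (fun x => x) false).map
        (fun r => (r, runsB (PySem.List.sorted
          ((positions.filter (fun q => q.1 == r)).map (fun q => q.2)) (fun x => x) false)))) : PySem.Dict Int (List String))
      = ((PySem.List.sorted rows.keys (fun x => x) false).map
        (fun r => (r, runsB (PySem.List.sorted
          ((positions.filter (fun q => q.1 == r)).map (fun q => q.2)) (fun x => x) false)))).foldl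
          (fun d p => d.insert p.1 p.2) PySem.Dict.empty from rfl]
  rw [hA, hB]
  simp only [List.map_map, Function.comp_def]
  refine List.map_congr_left ?_
  intro r _
  simp [hgetD r, compressRanges_eq]
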